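-- pv_equiv track=rewrite | github.com/kanitsch/ASD | dynamiczne/ASD - Kolokwium 2/zad5k.py | garek
-- ===== SOURCE A (Python) =====
-- def garek ( A ):
--     n=len(A)
--     f=[[-1 for _ in range(n)] for _ in range(n)]
--     def rek(p,k):
--         if f[p][k]!=-1:
--             return f[p][k]
--         elif p==k:
--             f[p][k]=A[p]
--         elif p==k-1:
--             f[p][k]=max(A[p:k+1])
--         else:
--             f[p][k]=max(A[p]+min(rek(p+2,k),rek(p+1,k-1)),A[k]+min(rek(p,k-2),rek(p+1,k-1)))
--         return f[p][k]
--     return rek(0,n-1)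
-- ===== SOURCE B (Python) =====
-- def garek(A):
--     n = len(A)
--     if n == 1:
--         return A[0]
--     prev2 = list(A)                                   # interval gap 0
--     prev = [max(A[p], A[p + 1]) for p in range(n - 1)]  # interval gap 1
--     for w in range(2, n):
--         cur = [max(A[p] + min(prev2[p + 2], prev2[p + 1]),
--                    A[p + w] + min(prev2[p], prev2[p + 1]))
--                for p in range(n - w)]
--         prev2, prev = prev, cur
--     return prev[0]
-- ===== Notes on version B (the rewrite author's own statement) =====
-- stated objective: alternative
-- what changed: Replaced the memoized top-down recursion over intervals by an iterative bottom-up pass over interval widths that keeps only the last two width-rows (the recurrence only uses width w-2), removing recursion and the n*n memo table.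
import Mathlib
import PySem

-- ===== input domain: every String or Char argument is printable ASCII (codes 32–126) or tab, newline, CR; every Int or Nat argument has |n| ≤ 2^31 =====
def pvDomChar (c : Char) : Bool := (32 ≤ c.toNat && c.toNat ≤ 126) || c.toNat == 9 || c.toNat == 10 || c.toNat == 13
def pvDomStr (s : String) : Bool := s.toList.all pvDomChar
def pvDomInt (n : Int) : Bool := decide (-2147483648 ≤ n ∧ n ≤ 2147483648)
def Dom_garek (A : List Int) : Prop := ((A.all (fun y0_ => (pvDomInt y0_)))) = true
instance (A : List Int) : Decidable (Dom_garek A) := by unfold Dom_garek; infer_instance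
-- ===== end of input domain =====

-- B replaces A's memoized top-down recursion by an iterative bottom-up pass over interval
-- widths keeping only the last two width-rows (the recurrence only uses width w-2):
-- same values, no recursion and no n×n memo table (O(n) instead of O(n^2) space).

-- ===== PORT A =====
-- memoized recursion: the memo table f is threaded as a Dict keyed by (p, k), default -1
-- (the Python sentinel); fuel only makes the recursion total (ample under Pre_).
def garekRek (A : List Int) : Nat → PySem.Dict (Int × Int) Int → Int → Int → Int × PySem.Dict (Int × Int) Int
  | 0, f, _, _ => (0, f)
  | fuel+1, f, p, k =>
    let v := f.getD (p, k) (-1)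
    if v ≠ -1 then (v, f)
    else if p = k then
      let x := PySem.List.pyGetD A p 0
      (x, f.insert (p, k) x)
    else if p = k - 1 then
      let x := (PySem.List.max? (PySem.List.slice A (some p) (some (k+1))) (fun y => y)).getD 0
      (x, f.insert (p, k) x)
    else
      let r1 := garekRek A fuel f (p+2) k
      let r2 := garekRek A fuel r1.2 (p+1) (k-1)
      let r3 := garekRek A fuel r2.2 p (k-2)
      let r4 := garekRek A fuel r3.2 (p+1) (k-1)
      let x := max (PySem.List.pyGetD A p 0 + min r1.1 r2.1)
                   (PySem.List.pyGetD A k 0 + min r3.1 r4.1)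
      (x, r4.2.insert (p, k) x)

def garek (A : List Int) : Int :=
  (garekRek A (A.length + 1) PySem.Dict.empty 0 ((A.length : Int) - 1)).1

-- ===== PORT B =====
-- one loop iteration: from (row of width w-2, row of width w-1) to (row w-1, row w)
def garekStep (A : List Int) (n : Int) (st : List Int × List Int) (w : Int) : List Int × List Int :=
  (st.2, (PySem.List.pyRange 0 (n - w) 1).map (fun p =>
    max (PySem.List.pyGetD A p 0 + min (PySem.List.pyGetD st.1 (p+2) 0) (PySem.List.pyGetD st.1 (p+1) 0))
        (PySem.List.pyGetD A (p+w) 0 + min (PySem.List.pyGetD st.1 p 0) (PySem.List.pyGetD st.1 (p+1) 0))))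

def garek_alt (A : List Int) : Int :=
  let n : Int := A.length
  if n = 1 then PySem.List.pyGetD A 0 0
  else
    let prev : List Int := (PySem.List.pyRange 0 (n-1) 1).map
      (fun p => max (PySem.List.pyGetD A p 0) (PySem.List.pyGetD A (p+1) 0))
    let st := (PySem.List.pyRange 2 n 1).foldl (garekStep A n) (A, prev)
    PySem.List.pyGetD st.2 0 0

-- ===== PRECONDITION & SPEC =====
-- Pre_ excludes only the empty list, on which the Python A raises IndexError (f[0][-1] on an empty table).
def Pre_garek (A : List Int) : Prop := A ≠ []
instance (A : List Int) : Decidable (Pre_garek A) := by unfold Pre_garek; infer_instance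
def pvWitness_garek : List Int := [3, 1, 2]

def Spec_garek (A : List Int) (out : Int) : Prop := out = garek_alt A
instance (A : List Int) (out : Int) : Decidable (Spec_garek A out) := by unfold Spec_garek; infer_instance

-- ===== CLAIM (what is proved, stated in full; the proofs are below) =====
def Claim_equal_garek : Prop := ∀ (A : List Int), Dom_garek A → Pre_garek A → Spec_garek A (garek A)

-- ===== LEMMAS AND PROOFS =====

-- the game value of the interval of gap g starting at p (length g+1)
def gVal (A : List Int) : Nat → Int → Int
  | 0, p => PySem.List.pyGetD A p 0
  | 1, p => max (PySem.List.pyGetD A p 0) (PySem.List.pyGetD A (p+1) 0)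
  | (g+2), p => max (PySem.List.pyGetD A p 0 + min (gVal A g (p+2)) (gVal A g (p+1)))
                    (PySem.List.pyGetD A ((g : Int) + 2 + p) 0 + min (gVal A g p) (gVal A g (p+1)))

def GoodMemo (A : List Int) (f : PySem.Dict (Int × Int) Int) : Prop :=
  ∀ p k v, f.get? (p, k) = some v → v = gVal A (k - p).toNat p

theorem GoodMemo_insert (A : List Int) (f : PySem.Dict (Int × Int) Int) (p k x : Int)
    (hf : GoodMemo A f) (hx : x = gVal A (k - p).toNat p) :
    GoodMemo A (f.insert (p, k) x) := by
  intro p' k' v' hv'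
  rw [PySem.Dict.get?_insert] at hv'
  by_cases he : (p', k') = (p, k)
  · rw [if_pos he] at hv'
    cases hv'
    simp only [Prod.mk.injEq] at he
    obtain ⟨rfl, rfl⟩ := he
    exact hx
  · rw [if_neg he] at hv'
    exact hf _ _ _ hv'

theorem gVal_base1 (A : List Int) (p k : Int) (hp : 0 ≤ p) (hk : p = k - 1)
    (hn : k < (A.length : Int)) :
    (PySem.List.max? (PySem.List.slice A (some p) (some (k+1))) (fun y => y)).getD 0 = gVal A 1 p := by
  have hke : k = p + 1 := by omega
  subst hke
  have hlen : p.toNat + 1 < A.length := by omega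
  have hs : PySem.List.slice A (some p) (some (p + 1 + 1))
      = [A[p.toNat], A[p.toNat + 1]] := by
    rw [PySem.List.slice_toNat A hp (by omega),
        show (p + 1 + 1).toNat - p.toNat = 2 by omega,
        List.drop_eq_getElem_cons (show p.toNat < A.length by omega),
        List.take_succ_cons,
        List.drop_eq_getElem_cons hlen,
        List.take_succ_cons]
    simp
  rw [hs, PySem.List.max?_id_cons]
  simp only [List.foldl_cons, List.foldl_nil, Option.getD_some, gVal]
  rw [PySem.List.pyGetD_eq_getElem A (0 : Int) hp (by omega),
      PySem.List.pyGetD_eq_getElem A (0 : Int) (show (0:Int) ≤ p + 1 by omega) (by omega)]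
  simp only [show (p+1).toNat = p.toNat + 1 from by omega]

theorem rekA_correct (A : List Int) : ∀ (fuel : Nat) (f : PySem.Dict (Int × Int) Int) (p k : Int),
    GoodMemo A f → 0 ≤ p → p ≤ k → k < (A.length : Int) → k - p < 2 * fuel →
    (garekRek A fuel f p k).1 = gVal A (k - p).toNat p ∧ GoodMemo A (garekRek A fuel f p k).2 := by
  intro fuel
  induction fuel with
  | zero =>
    intro f p k _ _ hpk _ hfuel
    exact absurd hfuel (by omega)
  | succ fuel ih =>
    intro f p k hf hp hpk hkn hfuel
    simp only [garekRek]
    split_ifs with h1 h2 h3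
    · -- memo hit
      cases hsome : PySem.Dict.get? f (p, k) with
      | none =>
        exact absurd (PySem.Dict.getD_of_get?_eq_none f (-1) hsome) h1
      | some w =>
        have hw := hf _ _ _ hsome
        have : PySem.Dict.getD f (p, k) (-1) = w := PySem.Dict.getD_of_get?_eq_some f (-1) hsome
        exact ⟨by simpa [this] using hw, hf⟩
    · -- p = k
      refine ⟨?_, GoodMemo_insert A f p k _ hf ?_⟩ <;>
        · rw [show (k - p).toNat = 0 by omega]
          simp [gVal, h2]
    · -- p = k - 1
      have hx := gVal_base1 A p k hp h3 hkn
      refine ⟨?_, GoodMemo_insert A f p k _ hf ?_⟩ <;>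
        · rw [show (k - p).toNat = 1 by omega]
          exact hx
    · -- recursive case
      have hgap : 2 ≤ k - p := by omega
      obtain ⟨e1, g1⟩ := ih f (p+2) k hf (by omega) (by omega) hkn (by omega)
      obtain ⟨e2, g2⟩ := ih (garekRek A fuel f (p+2) k).2 (p+1) (k-1) g1 (by omega) (by omega) (by omega) (by omega)
      obtain ⟨e3, g3⟩ := ih (garekRek A fuel (garekRek A fuel f (p+2) k).2 (p+1) (k-1)).2 p (k-2) g2 hp (by omega) (by omega) (by omega)
      obtain ⟨e4, g4⟩ := ih (garekRek A fuel (garekRek A fuel (garekRek A fuel f (p+2) k).2 (p+1) (k-1)).2 p (k-2)).2 (p+1) (k-1) g3 (by omega) (by omega) (by omega) (by omega)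
      obtain ⟨g, hg⟩ : ∃ g : Nat, (k - p).toNat = g + 2 := ⟨(k - p).toNat - 2, by omega⟩
      rw [show (k - (p+2)).toNat = g by omega] at e1
      rw [show ((k-1) - (p+1)).toNat = g by omega] at e2
      rw [show ((k-2) - p).toNat = g by omega] at e3
      rw [show ((k-1) - (p+1)).toNat = g by omega] at e4
      constructor
      · rw [e1, e2, e3, e4, hg]
        simp only [gVal]
        rw [show (g : Int) + 2 + p = k by omega]
      · apply GoodMemo_insert A _ p k _ g4
        rw [e1, e2, e3, e4, hg]
        simp only [gVal]
        rw [show (g : Int) + 2 + p = k by omega]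

def rowG (A : List Int) (g : Nat) : List Int :=
  (PySem.List.pyRange 0 ((A.length : Int) - g) 1).map (fun p => gVal A g p)

theorem rowG_get (A : List Int) (g : Nat) (p : Int) (h0 : 0 ≤ p) (h1 : p < (A.length : Int) - g) :
    PySem.List.pyGetD (rowG A g) p 0 = gVal A g p := by
  unfold rowG
  exact PySem.List.pyGetD_map_pyRange_of_nonneg _ _ _ _ h0 h1

theorem rowG_zero (A : List Int) : rowG A 0 = A := by
  unfold rowG
  simp only [Nat.cast_zero, Int.sub_zero, gVal]
  exact PySem.List.map_pyGetD_pyRange_zero' A 0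

theorem stepRow (A : List Int) (w : Int) (h2 : 2 ≤ w) :
    garekStep A (A.length : Int) (rowG A (w.toNat - 2), rowG A (w.toNat - 1)) w
      = (rowG A (w.toNat - 1), rowG A w.toNat) := by
  obtain ⟨g, hg⟩ : ∃ g : Nat, w.toNat = g + 2 := ⟨w.toNat - 2, by omega⟩
  have hm2 : w.toNat - 2 = g := by omega
  have hm1 : w.toNat - 1 = g + 1 := by omega
  rw [hm2, hm1, hg]
  refine Prod.ext rfl ?_
  show (PySem.List.pyRange 0 ((A.length : Int) - w) 1).map _ = rowG A (g + 2)
  have hrow : rowG A (g + 2) = (PySem.List.pyRange 0 ((A.length : Int) - w) 1).map (fun p => gVal A (g + 2) p) := by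
    unfold rowG
    rw [show (A.length : Int) - ((g + 2 : Nat) : Int) = (A.length : Int) - w by omega]
  rw [hrow]
  apply List.map_congr_left
  intro p hp
  rw [PySem.List.mem_pyRange_one] at hp
  have hgw : (g : Int) = w - 2 := by omega
  have e1 : PySem.List.pyGetD (rowG A g) (p+2) 0 = gVal A g (p+2) :=
    rowG_get A g (p+2) (by omega) (by omega)
  have e2 : PySem.List.pyGetD (rowG A g) (p+1) 0 = gVal A g (p+1) :=
    rowG_get A g (p+1) (by omega) (by omega)
  have e3 : PySem.List.pyGetD (rowG A g) p 0 = gVal A g p :=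
    rowG_get A g p (by omega) (by omega)
  simp only [e1, e2, e3, gVal]
  rw [show (g : Int) + 2 + p = p + w by omega]

theorem loopRows (A : List Int) : ∀ j : Nat,
    (PySem.List.pyRange 2 (2 + (j : Int)) 1).foldl (garekStep A (A.length : Int)) (rowG A 0, rowG A 1)
      = (rowG A j, rowG A (j + 1)) := by
  intro j
  induction j with
  | zero => simp [PySem.List.pyRange_one_eq_nil]
  | succ j ih =>
    rw [show ((j + 1 : Nat) : Int) = (j : Int) + 1 by push_cast; ring,
        show (2 : Int) + ((j : Int) + 1) = (2 + (j : Int)) + 1 by ring,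
        PySem.List.pyRange_one_succ_right (by omega), List.foldl_append]
    simp only [List.foldl_cons, List.foldl_nil, ih]
    have hs := stepRow A (2 + (j : Int)) (by omega)
    rw [show (2 + (j : Int)).toNat = j + 2 by omega] at hs
    simpa using hs

theorem garek_eq_gVal (A : List Int) (h : A ≠ []) :
    garek A = gVal A (A.length - 1) 0 := by
  have hn : 1 ≤ A.length := List.length_pos_iff.mpr h
  have h0 : GoodMemo A PySem.Dict.empty := by
    intro p k v hv
    rw [PySem.Dict.get?_empty] at hv
    cases hv
  unfold garek
  rw [(rekA_correct A (A.length + 1) PySem.Dict.empty 0 ((A.length : Int) - 1) h0 le_rfl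
    (by omega) (by omega) (by omega)).1]
  rw [show (((A.length : Int) - 1) - 0).toNat = A.length - 1 by omega]

theorem garek_alt_eq_gVal (A : List Int) (h : A ≠ []) :
    garek_alt A = gVal A (A.length - 1) 0 := by
  have hn : 1 ≤ A.length := List.length_pos_iff.mpr h
  by_cases h1 : (A.length : Int) = 1
  · simp only [garek_alt, if_pos h1, show A.length - 1 = 0 by omega]
    simp [gVal]
  · simp only [garek_alt, if_neg h1]
    have h2 : 2 ≤ A.length := by omega
    have hprev : (PySem.List.pyRange 0 ((A.length : Int) - 1) 1).map
        (fun p => max (PySem.List.pyGetD A p 0) (PySem.List.pyGetD A (p+1) 0)) = rowG A 1 := by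
      unfold rowG
      rw [show ((A.length : Int) - ((1 : Nat) : Int)) = (A.length : Int) - 1 by omega]
      rfl
    have L := loopRows A (A.length - 2)
    rw [show (2 : Int) + ((A.length - 2 : Nat) : Int) = (A.length : Int) by omega,
        rowG_zero, ← hprev] at L
    rw [L]
    rw [show A.length - 2 + 1 = A.length - 1 by omega]
    rw [rowG_get A (A.length - 1) 0 le_rfl (by omega)]

-- ===== VERDICT (by name: the statement is the Claim_ definition above) =====
theorem garek_spec : Claim_equal_garek := by
  intro A _ hpre
  unfold Spec_garek
  rw [garek_eq_gVal A hpre, garek_alt_eq_gVal A hpre]
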